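-- pv_equiv track=rewrite | github.com/choiszt/SG_VLM | scripts/process_iterative_planning_octopus.py | find_last_continuous_ones_index
-- ===== SOURCE A (Python) =====
-- def find_last_continuous_ones_index(lst):
--     start = None
--     end = None
--     if lst[-1]==0:
--         return None
--     for i in range(len(lst) - 1, -1, -1):
--         if lst[i] == 1:
--             if end is None:
--                 end = i
--             start = i
--         else:
--             if end is not None:
--                 break
--     return start, end
-- ===== SOURCE B (Python) =====
-- def find_last_continuous_ones_index(lst):
--     if lst[-1] == 0:
--         return None
--     end = None
--     for i, v in enumerate(lst):
--         if v == 1: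
--             end = i
--     if end is None:
--         return None, None
--     start = end
--     while start - 1 >= 0 and lst[start - 1] == 1:
--         start -= 1
--     return start, end
-- ===== Notes on version B (the rewrite author's own statement) =====
-- stated objective: alternative
-- what changed: Replaces the single reverse scan with break and Optional state by a forward pass that records the last index equal to 1, then a backward while-loop expanding that index to the start of its run.
-- outside the precondition, e.g. on find_last_continuous_ones_index([2]): A returns (None, None), B returns (None, None)
import Mathlib
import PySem

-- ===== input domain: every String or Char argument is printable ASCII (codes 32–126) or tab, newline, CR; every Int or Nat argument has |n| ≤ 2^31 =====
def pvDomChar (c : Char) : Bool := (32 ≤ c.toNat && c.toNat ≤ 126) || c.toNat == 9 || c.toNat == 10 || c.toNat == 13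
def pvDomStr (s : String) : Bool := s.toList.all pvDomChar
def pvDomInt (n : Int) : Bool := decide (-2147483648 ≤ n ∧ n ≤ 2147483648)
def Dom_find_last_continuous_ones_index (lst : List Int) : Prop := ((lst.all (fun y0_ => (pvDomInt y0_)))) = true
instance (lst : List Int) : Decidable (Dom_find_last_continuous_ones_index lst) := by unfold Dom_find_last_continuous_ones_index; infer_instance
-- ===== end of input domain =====

-- B replaces A's reverse scan-with-break by a forward pass locating the last 1 and a backward
-- while-loop expanding it to the start of its run (objective: alternative decomposition).

-- ===== PORT A =====
-- the for-loop of A over range(len-1,-1,-1): state (start, end), break when a non-1 is hit after end is set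
def pvALoop (lst : List Int) : List Int → Option Int → Option Int → Option Int × Option Int
  | [], s, e => (s, e)
  | i :: rest, s, e =>
    if PySem.List.pyGetD lst i 0 = 1 then
      pvALoop lst rest (some i) (if e = none then some i else e)
    else if e ≠ none then (s, e)
    else pvALoop lst rest s e

def find_last_continuous_ones_index (lst : List Int) : Option (Int × Int) :=
  match PySem.List.pyGet? lst (-1) with
  | none => none  -- IndexError on the empty list; excluded by Pre_
  | some v =>
    if v = 0 then none
    else
      match pvALoop lst (PySem.List.pyRange ((lst.length : Int) - 1) (-1) (-1)) none none with
      | (some s, some e) => some (s, e)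
      | _ => none  -- Python returns the tuple (None, None) here, not representable; excluded by Pre_

-- ===== PORT B =====
-- B's 'while start - 1 >= 0 and lst[start-1] == 1: start -= 1'
def pvBWhile (lst : List Int) (start : Int) : Int :=
  if h : 0 ≤ start - 1 ∧ PySem.List.pyGetD lst (start - 1) 0 = 1 then
    pvBWhile lst (start - 1)
  else start
termination_by start.toNat
decreasing_by omega

def find_last_continuous_ones_index_alt (lst : List Int) : Option (Int × Int) :=
  match PySem.List.pyGet? lst (-1) with
  | none => none  -- IndexError on the empty list; excluded by Pre_
  | some v =>
    if v = 0 then none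
    else
      match (PySem.List.enumerate lst 0).foldl
              (fun acc p => if p.2 = 1 then some p.1 else acc) (none : Option Int) with
      | none => none  -- Python returns the tuple (None, None) here, not representable; excluded by Pre_
      | some e => some (pvBWhile lst e, e)

-- ===== PRECONDITION & SPEC =====
-- Pre_ excludes the empty list, on which A raises IndexError, and lists containing no 1 whose last
-- element is nonzero, on which A returns the tuple (None, None) — not a value of type Option (Int × Int).
def Pre_find_last_continuous_ones_index (lst : List Int) : Prop :=
  lst ≠ [] ∧ ((1 : Int) ∈ lst ∨ lst.getLast? = some 0)
instance (lst : List Int) : Decidable (Pre_find_last_continuous_ones_index lst) := by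
  unfold Pre_find_last_continuous_ones_index; infer_instance

def pvWitness_find_last_continuous_ones_index : List Int := [0, 1, 1]

def Spec_find_last_continuous_ones_index (lst : List Int) (out : Option (Int × Int)) : Prop :=
  out = find_last_continuous_ones_index_alt lst
instance (lst : List Int) (out : Option (Int × Int)) : Decidable (Spec_find_last_continuous_ones_index lst out) := by
  unfold Spec_find_last_continuous_ones_index; infer_instance

-- ===== CLAIM (what is proved, stated in full; the proofs are below) =====
def Claim_equal_find_last_continuous_ones_index : Prop :=
  ∀ (lst : List Int), Dom_find_last_continuous_ones_index lst →
    Pre_find_last_continuous_ones_index lst →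
    Spec_find_last_continuous_ones_index lst (find_last_continuous_ones_index lst)

-- ===== LEMMAS AND PROOFS =====
-- A's loop skips indices above the last 1 without touching the state
theorem pv_aLoop_skip (lst : List Int) :
    ∀ (k : Nat) (a e : Int), a = e + k → -1 ≤ e →
      (∀ i : Int, e < i → i ≤ a → PySem.List.pyGetD lst i 0 ≠ 1) →
      pvALoop lst (PySem.List.pyRange a (-1) (-1)) none none
        = pvALoop lst (PySem.List.pyRange e (-1) (-1)) none none := by
  intro k
  induction k with
  | zero => intro a e ha _ _; simp at ha; rw [ha]
  | succ k ih =>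
    intro a e ha he hne
    rw [PySem.List.pyRange_neg_one_cons (show (-1:Int) < a by omega)]
    have h1 : PySem.List.pyGetD lst a 0 ≠ 1 := hne a (by omega) le_rfl
    simp only [pvALoop, if_neg h1, ne_eq, not_true_eq_false, reduceIte]
    exact ih (a - 1) e (by omega) he (fun i hi1 hi2 => hne i hi1 (by omega))

-- after the last 1 is found, A's loop computes exactly B's while-loop
theorem pv_aLoop_desc (lst : List Int) :
    ∀ (m : Nat) (s e : Int), s.toNat = m → 0 ≤ s →
      pvALoop lst (PySem.List.pyRange (s - 1) (-1) (-1)) (some s) (some e)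
        = (some (pvBWhile lst s), some e) := by
  intro m
  induction m with
  | zero =>
    intro s e hm hs
    have : s = 0 := by omega
    subst this
    rw [PySem.List.pyRange_neg_one_eq_nil (by omega)]
    rw [pvBWhile]
    simp [pvALoop]
  | succ k ih =>
    intro s e hm hs
    rw [PySem.List.pyRange_neg_one_cons (show (-1:Int) < s - 1 by omega)]
    by_cases h1 : PySem.List.pyGetD lst (s - 1) 0 = 1
    · simp only [pvALoop, if_pos h1]
      have hst : (if (some e : Option Int) = none then some (s-1) else some e) = some e := by simp
      rw [hst]
      have hrec := ih (s - 1) e (by omega) (by omega)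
      rw [hrec]
      conv_rhs => rw [pvBWhile]
      rw [dif_pos (show 0 ≤ s - 1 ∧ PySem.List.pyGetD lst (s - 1) 0 = 1 from ⟨by omega, h1⟩)]
    · simp only [pvALoop, if_neg h1, ne_eq]
      conv_rhs => rw [pvBWhile]
      rw [dif_neg (show ¬(0 ≤ s - 1 ∧ PySem.List.pyGetD lst (s - 1) 0 = 1) from
            fun hc => h1 hc.2)]
      simp

-- B's forward fold returns the greatest index holding a 1
theorem pv_bfold (xs : List Int) (e : Nat) (he : e < xs.length)
    (h1 : xs.getD e 0 = 1)
    (hmax : ∀ i : Nat, e < i → i < xs.length → xs.getD i 0 ≠ 1) :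
    (PySem.List.enumerate xs 0).foldl
        (fun acc p => if p.2 = 1 then some p.1 else acc) (none : Option Int)
      = some (e : Int) := by
  induction xs using List.reverseRecOn with
  | nil => simp at he
  | append_singleton xs x ih =>
    rw [PySem.List.enumerate_append, List.foldl_append]
    have hxlen : (PySem.List.enumerate [x] (0 + xs.length)) = [((xs.length : Int), x)] := by
      simp [PySem.List.enumerate]
    rw [hxlen]
    simp only [List.foldl_cons, List.foldl_nil]
    have hgetlast : (xs ++ [x]).getD xs.length 0 = x := by
      simp [List.getD_eq_getElem?_getD]
    by_cases hx : x = 1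
    · have hee : e = xs.length := by
        by_contra hne
        have helt : e < xs.length := by simp at he; omega
        exact hmax xs.length (by omega) (by simp) (by rw [hgetlast]; exact hx)
      simp [hx, hee]
    · have helt : e < xs.length := by
        by_contra hge
        have hee : e = xs.length := by simp at he; omega
        rw [hee, hgetlast] at h1
        exact hx h1
      have h1' : xs.getD e 0 = 1 := by
        rw [List.getD_eq_getElem?_getD, List.getElem?_append_left helt] at h1
        rwa [List.getD_eq_getElem?_getD]
      have hmax' : ∀ i : Nat, e < i → i < xs.length → xs.getD i 0 ≠ 1 := by
        intro i hi1 hi2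
        have h := hmax i hi1 (by simp; omega)
        rw [List.getD_eq_getElem?_getD, List.getElem?_append_left hi2] at h
        rwa [List.getD_eq_getElem?_getD]
      rw [if_neg hx]
      exact ih helt h1' hmax'


-- ===== VERDICT (by name: the statement is the Claim_ definition above) =====
theorem find_last_continuous_ones_index_spec : Claim_equal_find_last_continuous_ones_index := by
  unfold Claim_equal_find_last_continuous_ones_index
  intro lst _ hpre
  obtain ⟨hnil, hp⟩ := hpre
  unfold Spec_find_last_continuous_ones_index
  unfold find_last_continuous_ones_index find_last_continuous_ones_index_alt
  cases hg : PySem.List.pyGet? lst (-1) with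
  | none => rfl
  | some v =>
    by_cases hv : v = 0
    · dsimp only
      simp [hv]
    · dsimp only
      rw [if_neg hv]
      -- the last element is v ≠ 0, so Pre_ gives 1 ∈ lst
      rw [PySem.List.pyGet?_neg_one] at hg
      have h1m : (1 : Int) ∈ lst := by
        rcases hp with h | h
        · exact h
        · rw [h] at hg; exact absurd (Option.some.inj hg).symm hv
      obtain ⟨j, hj, hje⟩ := List.mem_iff_getElem.mp h1m
      set n := lst.length with hn
      have hn1 : 1 ≤ n := by omega
      -- e = greatest index holding a 1
      set P : Nat → Prop := fun i => lst.getD i 0 = 1 with hP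
      have hPdec : DecidablePred P := fun i => by rw [hP]; infer_instance
      set e := Nat.findGreatest P (n - 1) with he
      have hPj : P j := by
        simp only [hP, List.getD_eq_getElem?_getD, List.getElem?_eq_getElem hj, hje,
          Option.getD_some]
      have hPe : P e := Nat.findGreatest_spec (m := j) (by omega) hPj
      have helt : e < n := by
        have := Nat.findGreatest_le (P := P) (n - 1)
        omega
      have hmax : ∀ i : Nat, e < i → i < n → ¬ P i := by
        intro i hi1 hi2
        exact Nat.findGreatest_is_greatest hi1 (by omega)
      have hgetD_int : ∀ i : Int, 0 ≤ i → i < (n : Int) →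
          PySem.List.pyGetD lst i 0 = lst.getD i.toNat 0 := by
        intro i h0 h1
        rw [PySem.List.pyGetD_eq_getElem lst 0 h0 (by omega)]
        rw [List.getD_eq_getElem?_getD, List.getElem?_eq_getElem (by omega), Option.getD_some]
      -- A side
      have hskip := pv_aLoop_skip lst (n - 1 - e) ((n : Int) - 1) (e : Int)
        (by omega) (by omega)
        (by
          intro i hi1 hi2
          rw [hgetD_int i (by omega) (by omega)]
          have := hmax i.toNat (by omega) (by omega)
          simpa [hP] using this)
      rw [hskip]
      rw [PySem.List.pyRange_neg_one_cons (show (-1 : Int) < (e : Int) by omega)]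
      have hPe' : PySem.List.pyGetD lst (e : Int) 0 = 1 := by
        rw [hgetD_int (e : Int) (by omega) (by omega)]
        simpa [hP] using hPe
      simp only [pvALoop, if_pos hPe', reduceIte]
      rw [pv_aLoop_desc lst (e : Int).toNat (e : Int) (e : Int) rfl (by omega)]
      -- B side
      have hbf := pv_bfold lst e helt (by simpa [hP] using hPe)
        (fun i hi1 hi2 => by have := hmax i hi1 hi2; simpa [hP] using this)
      rw [hbf]
      simp [hv]
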